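-- pv_equiv track=rewrite | github.com/kano-ai-org/kano-agent-backlog-skill | scripts/backlog/view_refresh_dashboards.py | parse_products_values
-- ===== SOURCE A (Python) =====
-- from typing import Any, Dict, List, Optional
--
-- def parse_products_values(values: Optional[List[str]]) -> List[str]:
--     if not values:
--         return []
--     products: List[str] = []
--     for raw in values:
--         if not raw:
--             continue
--         for part in raw.split(","):
--             name = part.strip()
--             if name:
--                 products.append(name)
--     deduped: List[str] = []
--     seen: set[str] = set()
--     for name in products:
--         if name in seen:
--             continue
--         seen.add(name)
--         deduped.append(name)
--     return deduped
-- ===== SOURCE B (Python) =====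
-- def parse_products_values(values):
--     tokens = [part.strip() for raw in (values or []) if raw for part in raw.split(",")]
--     pending = [t for t in tokens if t]
--     out = []
--     while pending:
--         head = pending[0]
--         out.append(head)
--         pending = [n for n in pending[1:] if n != head]
--     return out
-- ===== Notes on version B (the rewrite author's own statement) =====
-- stated objective: alternative
-- what changed: Replaces A's seen-set dedup loop with a nub-by-filtering worklist (take the head, filter all its later duplicates out of the pending list, repeat), and builds the token list in one comprehension instead of nested append loops.
import Mathlib
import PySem

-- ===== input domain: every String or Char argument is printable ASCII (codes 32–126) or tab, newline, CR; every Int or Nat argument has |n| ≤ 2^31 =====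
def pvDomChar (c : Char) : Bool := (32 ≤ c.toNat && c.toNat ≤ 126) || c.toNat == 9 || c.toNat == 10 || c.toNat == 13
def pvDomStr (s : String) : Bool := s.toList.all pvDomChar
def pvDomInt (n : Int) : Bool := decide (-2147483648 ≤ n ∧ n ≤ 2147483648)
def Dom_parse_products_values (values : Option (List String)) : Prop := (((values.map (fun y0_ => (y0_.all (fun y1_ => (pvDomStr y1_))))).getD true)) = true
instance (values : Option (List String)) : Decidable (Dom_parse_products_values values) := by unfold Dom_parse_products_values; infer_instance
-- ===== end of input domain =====

-- B replaces A's seen-set dedup loop with a nub-by-filtering worklist (take the head,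
-- filter its later duplicates out of the pending list, repeat) and builds the token
-- list in one comprehension; objective: alternative (same result, different algorithm).

-- ===== PORT A =====
-- raw.split(",") — sep is the nonempty literal ",", so split? is always some
def pvSplit (raw : String) : List String := (PySem.Str.split? raw ",").getD []

-- inner loop body of A's parsing phase: name = part.strip(); if name: products.append(name)
def pvA_istep (acc : List String) (part : String) : List String :=
  let name := PySem.Str.strip part
  if name ≠ "" then acc ++ [name] else acc

-- outer loop body of A's parsing phase
def pvA_step (acc : List String) (raw : String) : List String :=
  if raw = "" then acc else (pvSplit raw).foldl pvA_istep acc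

-- loop body of A's dedup phase (seen is a Python set)
def pvA_dstep (p : List String × PySem.Set String) (name : String) :
    List String × PySem.Set String :=
  if PySem.Set.contains p.2 name = true then p
  else (p.1 ++ [name], PySem.Set.add p.2 name)

def parse_products_values (values : Option (List String)) : List String :=
  match values with
  | none => []            -- `if not values`
  | some vs =>
    if vs = [] then []    -- `if not values` also true for the empty list
    else
      let products : List String := vs.foldl pvA_step []
      (products.foldl pvA_dstep ([], PySem.Set.empty)).1

-- ===== PORT B =====
-- the token comprehension: for raw in (values or []) if raw, for part in raw.split(",")
def pvB_tokens (vs : List String) : List String :=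
  (vs.filter (fun raw => raw ≠ "")).flatMap (fun raw => (pvSplit raw).map PySem.Str.strip)

-- B's while loop: pop the head, append it, drop all its duplicates from the pending list
def pvB_nub (out pending : List String) : List String :=
  match pending with
  | [] => out
  | head :: rest => pvB_nub (out ++ [head]) (rest.filter (fun n => n ≠ head))
termination_by pending.length
decreasing_by
  simp only [List.length_cons, List.length_unattach]
  exact Nat.lt_succ_of_le (le_trans (List.length_filter_le _ _) (by simp))

def parse_products_values_alt (values : Option (List String)) : List String :=
  let tokens := pvB_tokens (values.getD [])
  let pending := tokens.filter (fun t => t ≠ "")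
  pvB_nub [] pending

-- ===== PRECONDITION & SPEC =====
def Spec_parse_products_values (values : Option (List String)) (out : List String) : Prop := out = parse_products_values_alt values
instance (values : Option (List String)) (out : List String) : Decidable (Spec_parse_products_values values out) := by unfold Spec_parse_products_values; infer_instance

-- ===== CLAIM (what is proved, stated in full; the proofs are below) =====
def Claim_equal_parse_products_values : Prop := ∀ (values : Option (List String)), Dom_parse_products_values values → Spec_parse_products_values values (parse_products_values values)

-- ===== LEMMAS AND PROOFS =====

-- the (possibly empty) contribution of one comma-separated part
def pvf (part : String) : List String :=
  if PySem.Str.strip part ≠ "" then [PySem.Str.strip part] else []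

-- the contribution of one raw entry
def pvg (raw : String) : List String :=
  if raw = "" then [] else (pvSplit raw).flatMap pvf

theorem pvA_inner_eq (l : List String) (acc : List String) :
    l.foldl pvA_istep acc = acc ++ l.flatMap pvf := by
  induction l generalizing acc with
  | nil => simp
  | cons part rest ih =>
    simp only [List.foldl_cons, List.flatMap_cons]
    rw [ih]
    unfold pvA_istep pvf
    by_cases h : PySem.Str.strip part = "" <;> simp [h]

theorem pvA_products_eq (vs : List String) (acc : List String) :
    vs.foldl pvA_step acc = acc ++ vs.flatMap pvg := by
  induction vs generalizing acc with
  | nil => simp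
  | cons raw rest ih =>
    simp only [List.foldl_cons, List.flatMap_cons]
    rw [ih]
    unfold pvA_step pvg
    by_cases h : raw = "" <;> simp [h, pvA_inner_eq]

-- stripping then dropping empties is the per-part contribution pvf
theorem pv_filter_map_strip (l : List String) :
    (l.map PySem.Str.strip).filter (fun t => t ≠ "") = l.flatMap pvf := by
  induction l with
  | nil => simp
  | cons p ps ih =>
    by_cases hp : PySem.Str.strip p = "" <;>
      (simp only [List.map_cons, List.filter_cons, List.flatMap_cons, pvf, hp]; simp [hp]; simpa using ih)

theorem pvB_tokens_cons (raw : String) (rest : List String) :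
    pvB_tokens (raw :: rest)
      = (if raw = "" then [] else (pvSplit raw).map PySem.Str.strip) ++ pvB_tokens rest := by
  by_cases h : raw = "" <;> simp [pvB_tokens, h]

-- B's filtered token list is A's products list
theorem pvB_tokens_eq (vs : List String) :
    (pvB_tokens vs).filter (fun t => t ≠ "") = vs.flatMap pvg := by
  induction vs with
  | nil => simp [pvB_tokens]
  | cons raw rest ih =>
    rw [pvB_tokens_cons, List.filter_append, ih, List.flatMap_cons]
    congr 1
    by_cases h : raw = ""
    · simp [h, pvg]
    · rw [if_neg h, pv_filter_map_strip]
      simp [pvg, h]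

-- the seen-set fold and the nub-by-filtering loop compute the same list:
-- names already in `seen` are exactly the ones a pre-filter would drop
theorem pv_fold_eq_nub (n : Nat) (l : List String) (out : List String) (s : PySem.Set String)
    (hn : l.length ≤ n) :
    (l.foldl pvA_dstep (out, s)).1
      = pvB_nub out (l.filter (fun x => !(PySem.Set.contains s x))) := by
  induction n generalizing l out s with
  | zero =>
    have : l = [] := List.length_eq_zero_iff.mp (Nat.le_zero.mp hn)
    simp [this, pvB_nub]
  | succ n ih =>
    cases l with
    | nil => simp [pvB_nub]
    | cons h t =>
      have hn' : t.length ≤ n := Nat.le_of_succ_le_succ hn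
      simp only [List.foldl_cons, List.filter_cons]
      cases hc : PySem.Set.contains s h with
      | true =>
        simp only [pvA_dstep, hc, if_pos, Bool.not_true, Bool.false_eq_true]
        exact ih t out s hn'
      | false =>
        have hmem : h ∉ s := by simpa [PySem.Set.contains] using hc
        have hstep : pvA_dstep (out, s) h = (out ++ [h], PySem.Set.add s h) := by
          simp [pvA_dstep, PySem.Set.contains, hmem]
        rw [hstep]
        simp only [Bool.not_false, if_pos]
        rw [pvB_nub, ih t (out ++ [h]) (PySem.Set.add s h) hn', List.filter_filter]
        congr 1
        apply List.filter_congr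
        intro x _
        by_cases hx : x = h <;>
          simp [hx, PySem.Set.add, PySem.Set.contains, hmem, List.mem_append]

-- ===== VERDICT (by name: the statement is the Claim_ definition above) =====
theorem parse_products_values_spec : Claim_equal_parse_products_values := by
  intro values _
  unfold Spec_parse_products_values
  cases values with
  | none => simp [parse_products_values, parse_products_values_alt, pvB_tokens, pvB_nub]
  | some vs =>
    simp only [parse_products_values, parse_products_values_alt, Option.getD_some]
    by_cases h : vs = []
    · simp [h, pvB_tokens, pvB_nub]
    · rw [if_neg h]
      rw [pvA_products_eq, List.nil_append, pvB_tokens_eq,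
        pv_fold_eq_nub (vs.flatMap pvg).length _ _ _ (le_refl _)]
      congr 1
      simp [PySem.Set.empty, PySem.Set.contains]
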